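-- pv_equiv track=rewrite | github.com/redthing1/lldb-mix | lldb_mix/arch/match.py | allows_family
-- ===== SOURCE A (Python) =====
-- ARCH_FAMILIES: dict[str, tuple[str, ...]] = {
--     "x86_64": ("x86_64", "amd64", "x64"),
--     "arm64": ("arm64", "aarch64"),
--     "arm32": ("armv", "arm32", "arm-", "thumb"),
--     "riscv": ("riscv", "rv32", "rv64"),
-- }
--
-- def family_in_text(text: str, family: str) -> bool:
--     tokens = ARCH_FAMILIES.get(family, ())
--     if not tokens:
--         return False
--     lowered = (text or "").lower()
--     return any(token in lowered for token in tokens)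
--
-- def allows_family(triple: str, arch_name: str, family: str) -> bool:
--     triple_text = (triple or "").lower()
--     arch_text = (arch_name or "").lower()
--     if triple_text:
--         if family_in_text(triple_text, family):
--             return True
--         if any(
--             family_in_text(triple_text, other)
--             for other in ARCH_FAMILIES
--             if other != family
--         ):
--             return False
--     if arch_text:
--         if family_in_text(arch_text, family):
--             return True
--         if any(
--             family_in_text(arch_text, other)
--             for other in ARCH_FAMILIES
--             if other != family
--         ):
--             return False
--     return True
-- ===== SOURCE B (Python) =====
-- ARCH_FAMILIES: dict[str, tuple[str, ...]] = {
--     "x86_64": ("x86_64", "amd64", "x64"),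
--     "arm64": ("arm64", "aarch64"),
--     "arm32": ("armv", "arm32", "arm-", "thumb"),
--     "riscv": ("riscv", "rv32", "rv64"),
-- }
--
-- def allows_family(triple: str, arch_name: str, family: str) -> bool:
--     # Branch-free formulation: no early returns, no per-text loop, no empty-text
--     # guard.  A text with no detected family behaves exactly like an empty text
--     # (it decides nothing), so the whole cascade collapses to one boolean formula.
--     def detected(text: str) -> set:
--         low = (text or "").lower()
--         return {fam for fam, toks in ARCH_FAMILIES.items()
--                 if any(tok in low for tok in toks)}
--     t = detected(triple)
--     a = detected(arch_name)
--     return family in t or (not t and (family in a or not a))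
-- ===== Notes on version B (the rewrite author's own statement) =====
-- stated objective: simpler
-- what changed: Replaces A's two duplicated early-return blocks (four short-circuit any() scans with an explicit empty-text guard) by a single branch-free boolean formula over the per-text sets of detected families, using the fact that a text detecting no family decides nothing exactly like an empty text.
import Mathlib
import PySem

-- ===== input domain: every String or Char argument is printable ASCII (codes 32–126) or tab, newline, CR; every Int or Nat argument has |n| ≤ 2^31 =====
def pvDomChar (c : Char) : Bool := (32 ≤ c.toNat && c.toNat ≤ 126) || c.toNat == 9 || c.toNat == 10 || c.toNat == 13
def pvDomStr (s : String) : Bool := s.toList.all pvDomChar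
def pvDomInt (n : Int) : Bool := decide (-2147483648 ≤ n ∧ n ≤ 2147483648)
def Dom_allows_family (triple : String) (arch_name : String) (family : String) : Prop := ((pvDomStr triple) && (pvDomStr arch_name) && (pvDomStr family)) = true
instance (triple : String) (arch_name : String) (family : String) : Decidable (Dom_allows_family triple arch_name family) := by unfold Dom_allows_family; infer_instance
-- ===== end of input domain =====

-- B replaces A's early-return cascade over the two texts by a single branch-free boolean
-- formula over the per-text sets of detected families (a text detecting no family decides
-- nothing, just like an empty one, so the cascade collapses); objective: simpler.

-- ===== PORT A =====
def ARCH_FAMILIES : PySem.Dict String (List String) :=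
  PySem.Dict.ofList
    [ ("x86_64", ["x86_64", "amd64", "x64"])
    , ("arm64",  ["arm64", "aarch64"])
    , ("arm32",  ["armv", "arm32", "arm-", "thumb"])
    , ("riscv",  ["riscv", "rv32", "rv64"]) ]

def family_in_text (text : String) (family : String) : Bool :=
  let tokens := PySem.Dict.getD ARCH_FAMILIES family []
  if tokens.isEmpty then false
  else
    let lowered := PySem.Str.lower text    -- text is already a str, so '(text or "")' is text
    tokens.any (fun token => PySem.Str.isIn token lowered)

def allows_family (triple : String) (arch_name : String) (family : String) : Bool :=
  let triple_text := PySem.Str.lower triple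
  let arch_text := PySem.Str.lower arch_name
  -- the code after the triple block (reached when the triple block does not return):
  let after_triple : Bool :=
    if !arch_text.toList.isEmpty then
      if family_in_text arch_text family then true
      else if (PySem.Dict.keys ARCH_FAMILIES).any
            (fun other => (other != family) && family_in_text arch_text other) then false
      else true
    else true
  if !triple_text.toList.isEmpty then
    if family_in_text triple_text family then true
    else if (PySem.Dict.keys ARCH_FAMILIES).any
          (fun other => (other != family) && family_in_text triple_text other) then false
    else after_triple
  else after_triple

-- ===== PORT B =====
def allows_family_alt (triple : String) (arch_name : String) (family : String) : Bool :=
  let detected := fun (text : String) =>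
    PySem.Set.ofList
      (((PySem.Dict.items ARCH_FAMILIES).filter
          (fun p => p.2.any (fun tok => PySem.Str.isIn tok (PySem.Str.lower text)))).map Prod.fst)
  let t := detected triple
  let a := detected arch_name
  t.contains family || (t.isEmpty && (a.contains family || a.isEmpty))

-- ===== PRECONDITION & SPEC =====
def Spec_allows_family (triple : String) (arch_name : String) (family : String) (out : Bool) : Prop := out = allows_family_alt triple arch_name family
instance (triple : String) (arch_name : String) (family : String) (out : Bool) : Decidable (Spec_allows_family triple arch_name family out) := by unfold Spec_allows_family; infer_instance

-- ===== CLAIM (what is proved, stated in full; the proofs are below) =====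
def Claim_equal_allows_family : Prop := ∀ (triple : String) (arch_name : String) (family : String), Dom_allows_family triple arch_name family → Spec_allows_family triple arch_name family (allows_family triple arch_name family)

-- ===== LEMMAS AND PROOFS =====

theorem pvOfNat_toNat (n : Nat) (h : n < 0xd800) : (Char.ofNat n).toNat = n := by
  have hv : n.isValidChar := Or.inl h
  simp only [Char.ofNat, dif_pos hv, Char.ofNatAux, Char.toNat]
  simp

theorem pvLowerChar_idem (c : Char) : PySem.Chars.lowerChar (PySem.Chars.lowerChar c) = PySem.Chars.lowerChar c := by
  unfold PySem.Chars.lowerChar PySem.Chars.isupper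
  split_ifs with h1 h2
  · exfalso
    simp only [Bool.and_eq_true, decide_eq_true_eq, Char.le_def, UInt32.le_iff_toNat_le] at h1 h2
    have e1 : ('A' : Char).val.toNat = 65 := by decide
    have e2 : ('Z' : Char).val.toNat = 90 := by decide
    have hc : c.val.toNat = c.toNat := rfl
    have hof : (Char.ofNat (c.toNat + 32)).toNat = c.toNat + 32 :=
      pvOfNat_toNat _ (by have := h1.2; omega)
    have hof2 : (Char.ofNat (c.toNat + 32)).val.toNat = c.toNat + 32 := hof
    omega
  · rfl
  · rfl

theorem pvLower_idem (s : String) : PySem.Str.lower (PySem.Str.lower s) = PySem.Str.lower s := by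
  unfold PySem.Str.lower
  rw [String.toList_ofList]
  congr 1
  unfold PySem.Chars.lower
  rw [List.map_map]
  exact List.map_congr_left (fun c _ => pvLowerChar_idem c)

lemma ARCH_items : ARCH_FAMILIES.items = [ ("x86_64", ["x86_64", "amd64", "x64"]), ("arm64",  ["arm64", "aarch64"]), ("arm32",  ["armv", "arm32", "arm-", "thumb"]), ("riscv",  ["riscv", "rv32", "rv64"]) ] := by decide

-- A's per-text decision step (triple or arch block): some b = "return b", none = fall through.
def stepA (t family : String) : Option Bool :=
  if family_in_text t family then some true
  else if (PySem.Dict.keys ARCH_FAMILIES).any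
        (fun other => (other != family) && family_in_text t other) then some false
  else none

-- The same decision read off B's detected-family set of an (already lowered) text.
def stepS (t family : String) : Option Bool :=
  let S : PySem.Set String :=
    PySem.Set.ofList
      (((PySem.Dict.items ARCH_FAMILIES).filter
          (fun p => p.2.any (fun tok => PySem.Str.isIn tok t))).map Prod.fst)
  if S.contains family then some true
  else if !S.isEmpty then some false
  else none

lemma step_eq (t family : String) (ht : PySem.Str.lower t = t) :
    (if !t.toList.isEmpty then stepA t family else none) = stepS t family := by
  unfold stepA stepS family_in_text
  rw [ht]
  cases he : t.toList.isEmpty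
  case true =>
    have he' : t.toList = [] := List.isEmpty_iff.mp he
    have hfalse : ∀ l : List Char, l ≠ [] → PySem.Chars.isIn l t.toList = false := by
      intro l hl
      rw [PySem.Chars.isIn_eq_false_iff, he']
      simp [List.infix_nil, hl]
    simp [he, ARCH_items, List.filter, List.any, PySem.Set.ofList, PySem.Set.contains,
      hfalse]
  case false =>
  simp only [he, Bool.not_false, if_true]
  by_cases h1 : family = "x86_64"
  case pos =>
    subst h1
    simp only [PySem.Dict.getD, PySem.Dict.get?, PySem.Dict.keys, ARCH_items,
      List.find?, List.filter, List.any, List.map, PySem.Set.ofList, PySem.Set.contains,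
      List.foldl, String.reduceBEq, Option.map, Option.getD,
      List.isEmpty, List.contains, List.elem, Bool.false_or, Bool.or_false, bne,
      Bool.not_false, Bool.not_true, Bool.false_and, Bool.true_and, if_true, if_false]
    generalize PySem.Str.isIn "x86_64" t = b0
    generalize PySem.Str.isIn "amd64" t = b1
    generalize PySem.Str.isIn "x64" t = b2
    generalize PySem.Str.isIn "arm64" t = b3
    generalize PySem.Str.isIn "aarch64" t = b4
    generalize PySem.Str.isIn "armv" t = b5
    generalize PySem.Str.isIn "arm32" t = b6
    generalize PySem.Str.isIn "arm-" t = b7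
    generalize PySem.Str.isIn "thumb" t = b8
    generalize PySem.Str.isIn "riscv" t = b9
    generalize PySem.Str.isIn "rv32" t = b10
    generalize PySem.Str.isIn "rv64" t = b11
    revert b0 b1 b2 b3 b4 b5 b6 b7 b8 b9 b10 b11
    decide
  case neg =>
  by_cases h2 : family = "arm64"
  case pos =>
    subst h2
    simp only [PySem.Dict.getD, PySem.Dict.get?, PySem.Dict.keys, ARCH_items,
      List.find?, List.filter, List.any, List.map, PySem.Set.ofList, PySem.Set.contains,
      List.foldl, String.reduceBEq, Option.map, Option.getD,
      List.isEmpty, List.contains, List.elem, Bool.false_or, Bool.or_false, bne,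
      Bool.not_false, Bool.not_true, Bool.false_and, Bool.true_and, if_true, if_false]
    generalize PySem.Str.isIn "x86_64" t = b0
    generalize PySem.Str.isIn "amd64" t = b1
    generalize PySem.Str.isIn "x64" t = b2
    generalize PySem.Str.isIn "arm64" t = b3
    generalize PySem.Str.isIn "aarch64" t = b4
    generalize PySem.Str.isIn "armv" t = b5
    generalize PySem.Str.isIn "arm32" t = b6
    generalize PySem.Str.isIn "arm-" t = b7
    generalize PySem.Str.isIn "thumb" t = b8
    generalize PySem.Str.isIn "riscv" t = b9
    generalize PySem.Str.isIn "rv32" t = b10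
    generalize PySem.Str.isIn "rv64" t = b11
    revert b0 b1 b2 b3 b4 b5 b6 b7 b8 b9 b10 b11
    decide
  case neg =>
  by_cases h3 : family = "arm32"
  case pos =>
    subst h3
    simp only [PySem.Dict.getD, PySem.Dict.get?, PySem.Dict.keys, ARCH_items,
      List.find?, List.filter, List.any, List.map, PySem.Set.ofList, PySem.Set.contains,
      List.foldl, String.reduceBEq, Option.map, Option.getD,
      List.isEmpty, List.contains, List.elem, Bool.false_or, Bool.or_false, bne,
      Bool.not_false, Bool.not_true, Bool.false_and, Bool.true_and, if_true, if_false]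
    generalize PySem.Str.isIn "x86_64" t = b0
    generalize PySem.Str.isIn "amd64" t = b1
    generalize PySem.Str.isIn "x64" t = b2
    generalize PySem.Str.isIn "arm64" t = b3
    generalize PySem.Str.isIn "aarch64" t = b4
    generalize PySem.Str.isIn "armv" t = b5
    generalize PySem.Str.isIn "arm32" t = b6
    generalize PySem.Str.isIn "arm-" t = b7
    generalize PySem.Str.isIn "thumb" t = b8
    generalize PySem.Str.isIn "riscv" t = b9
    generalize PySem.Str.isIn "rv32" t = b10
    generalize PySem.Str.isIn "rv64" t = b11
    revert b0 b1 b2 b3 b4 b5 b6 b7 b8 b9 b10 b11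
    decide
  case neg =>
  by_cases h4 : family = "riscv"
  case pos =>
    subst h4
    simp only [PySem.Dict.getD, PySem.Dict.get?, PySem.Dict.keys, ARCH_items,
      List.find?, List.filter, List.any, List.map, PySem.Set.ofList, PySem.Set.contains,
      List.foldl, String.reduceBEq, Option.map, Option.getD,
      List.isEmpty, List.contains, List.elem, Bool.false_or, Bool.or_false, bne,
      Bool.not_false, Bool.not_true, Bool.false_and, Bool.true_and, if_true, if_false]
    generalize PySem.Str.isIn "x86_64" t = b0
    generalize PySem.Str.isIn "amd64" t = b1
    generalize PySem.Str.isIn "x64" t = b2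
    generalize PySem.Str.isIn "arm64" t = b3
    generalize PySem.Str.isIn "aarch64" t = b4
    generalize PySem.Str.isIn "armv" t = b5
    generalize PySem.Str.isIn "arm32" t = b6
    generalize PySem.Str.isIn "arm-" t = b7
    generalize PySem.Str.isIn "thumb" t = b8
    generalize PySem.Str.isIn "riscv" t = b9
    generalize PySem.Str.isIn "rv32" t = b10
    generalize PySem.Str.isIn "rv64" t = b11
    revert b0 b1 b2 b3 b4 b5 b6 b7 b8 b9 b10 b11
    decide
  case neg =>
    have e1 : ("x86_64" == family) = false := beq_eq_false_iff_ne.mpr (Ne.symm h1)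
    have f1 : (family == "x86_64") = false := beq_eq_false_iff_ne.mpr h1
    have e2 : ("arm64" == family) = false := beq_eq_false_iff_ne.mpr (Ne.symm h2)
    have f2 : (family == "arm64") = false := beq_eq_false_iff_ne.mpr h2
    have e3 : ("arm32" == family) = false := beq_eq_false_iff_ne.mpr (Ne.symm h3)
    have f3 : (family == "arm32") = false := beq_eq_false_iff_ne.mpr h3
    have e4 : ("riscv" == family) = false := beq_eq_false_iff_ne.mpr (Ne.symm h4)
    have f4 : (family == "riscv") = false := beq_eq_false_iff_ne.mpr h4
    simp only [PySem.Dict.getD, PySem.Dict.get?, PySem.Dict.keys, ARCH_items,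
      List.find?, List.filter, List.any, List.map, PySem.Set.ofList, PySem.Set.contains,
      List.foldl, String.reduceBEq, Option.map, Option.getD,
      List.isEmpty, List.contains, List.elem, Bool.false_or, Bool.or_false, bne,
      Bool.not_false, Bool.not_true, Bool.false_and, Bool.true_and, if_true, if_false, e1, f1, e2, f2, e3, f3, e4, f4]
    generalize (PySem.Str.isIn "x86_64" t || (PySem.Str.isIn "amd64" t || PySem.Str.isIn "x64" t)) = m1
    generalize (PySem.Str.isIn "arm64" t || PySem.Str.isIn "aarch64" t) = m2
    generalize (PySem.Str.isIn "armv" t || (PySem.Str.isIn "arm32" t || (PySem.Str.isIn "arm-" t || PySem.Str.isIn "thumb" t))) = m3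
    generalize (PySem.Str.isIn "riscv" t || (PySem.Str.isIn "rv32" t || PySem.Str.isIn "rv64" t)) = m4
    cases m1 <;> cases m2 <;> cases m3 <;> cases m4 <;>
      simp [f1, f2, f3, f4, PySem.Set.add, PySem.Set.empty, List.elem, h1, h2, h3, h4]

-- B's formula and the first-decision combination agree for every value of the four booleans.
lemma stepCombine (St Sa : PySem.Set String) (family : String) :
    (St.contains family || (St.isEmpty && (Sa.contains family || Sa.isEmpty))) =
      (match (if St.contains family then some true
              else if !St.isEmpty then some false else none : Option Bool) with
       | some b => b
       | none => (if Sa.contains family then some true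
                  else if !Sa.isEmpty then some false else none : Option Bool).getD true) := by
  cases hc : St.contains family <;> cases he : St.isEmpty <;>
    cases hc2 : Sa.contains family <;> cases he2 : Sa.isEmpty <;> simp [hc, he, hc2, he2]

-- A, rephrased as two per-text decision steps (first deciding step wins; default True).
lemma allows_family_as_steps (triple arch_name family : String) :
    allows_family triple arch_name family =
      (match (if !(PySem.Str.lower triple).toList.isEmpty then stepA (PySem.Str.lower triple) family else none) with
       | some b => b
       | none => (if !(PySem.Str.lower arch_name).toList.isEmpty then stepA (PySem.Str.lower arch_name) family else none).getD true) := by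
  unfold allows_family stepA
  split_ifs <;> simp_all

-- B's formula, rephrased through the per-set decision steps.
lemma allows_family_alt_as_steps (triple arch_name family : String) :
    allows_family_alt triple arch_name family =
      (match stepS (PySem.Str.lower triple) family with
       | some b => b
       | none => (stepS (PySem.Str.lower arch_name) family).getD true) := by
  unfold allows_family_alt stepS
  exact stepCombine _ _ family

theorem allows_family_agree (triple arch_name family : String) :
    allows_family triple arch_name family = allows_family_alt triple arch_name family := by
  rw [allows_family_as_steps, allows_family_alt_as_steps,
    ← step_eq (PySem.Str.lower triple) family (pvLower_idem triple),
    ← step_eq (PySem.Str.lower arch_name) family (pvLower_idem arch_name)]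

-- ===== VERDICT (by name: the statement is the Claim_ definition above) =====
theorem allows_family_spec : Claim_equal_allows_family := by
  intro triple arch_name family _
  exact allows_family_agree triple arch_name family
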